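-- pv_equiv track=rewrite | github.com/gravvy23/Python | generators/generators.py | gen5
-- ===== SOURCE A (Python) =====
-- def gen5(sekwencja):
--     flag = True
--     for i in range(len(sekwencja)):
--         if sekwencja[i]:
--             count = 0
--             for j in sekwencja[i+1:]:
--                 if not j: count=count+1
--                 else:
--                     yield count
--                     break
-- ===== SOURCE B (Python) =====
-- def gen5(sekwencja):
--     seen = False
--     count = 0
--     for x in sekwencja:
--         if x:
--             if seen:
--                 yield count
--             seen = True
--             count = 0
--         else:
--             count += 1
-- ===== Notes on version B (the rewrite author's own statement) =====
-- stated objective: faster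
-- what changed: Replaced the quadratic index loop with a forward scan per truthy element by a single pass that counts falsy elements since the last truthy one and yields the count at each subsequent truthy element.
import Mathlib
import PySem

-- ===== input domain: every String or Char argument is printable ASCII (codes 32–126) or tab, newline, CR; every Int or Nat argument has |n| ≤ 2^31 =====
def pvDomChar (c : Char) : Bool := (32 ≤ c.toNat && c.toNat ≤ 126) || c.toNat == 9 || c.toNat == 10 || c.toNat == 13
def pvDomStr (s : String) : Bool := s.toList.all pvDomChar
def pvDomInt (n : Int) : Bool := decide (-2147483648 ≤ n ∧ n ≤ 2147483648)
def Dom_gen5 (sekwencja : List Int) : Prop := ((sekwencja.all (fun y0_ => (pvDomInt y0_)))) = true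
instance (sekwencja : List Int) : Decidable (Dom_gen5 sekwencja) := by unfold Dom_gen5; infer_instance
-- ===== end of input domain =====

-- B replaces A's quadratic per-truthy forward scan by a single pass counting falsy
-- elements since the last truthy one (objective: faster, asymptotic).

-- ===== PORT A =====
-- inner loop: 'for j in sekwencja[i+1:]: if not j: count += 1 else: yield count; break'
def gen5_inner : List Int → Int → Option Int
  | [], _ => none
  | j :: rest, count => if j ≠ 0 then some count else gen5_inner rest (count + 1)

def gen5 (sekwencja : List Int) : List Int :=
  (PySem.List.pyRange 0 (sekwencja.length) 1).foldl
    (fun acc i =>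
      if PySem.List.pyGetD sekwencja i 0 ≠ 0 then
        acc ++ (gen5_inner (PySem.List.slice sekwencja (some (i + 1)) none) 0).toList
      else acc)
    []

-- ===== PORT B =====
-- loop body of B: state (out, seen, count)
def gen5_step (st : List Int × Bool × Int) (x : Int) : List Int × Bool × Int :=
  if x ≠ 0 then
    ((if st.2.1 then st.1 ++ [st.2.2] else st.1), true, 0)
  else
    (st.1, st.2.1, st.2.2 + 1)

def gen5_alt (sekwencja : List Int) : List Int :=
  (sekwencja.foldl gen5_step ([], false, 0)).1

-- ===== PRECONDITION & SPEC =====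
def Spec_gen5 (sekwencja : List Int) (out : List Int) : Prop := out = gen5_alt sekwencja
instance (sekwencja : List Int) (out : List Int) : Decidable (Spec_gen5 sekwencja out) := by unfold Spec_gen5; infer_instance

-- ===== CLAIM (what is proved, stated in full; the proofs are below) =====
def Claim_equal_gen5 : Prop := ∀ (sekwencja : List Int), Dom_gen5 sekwencja → Spec_gen5 sekwencja (gen5 sekwencja)

-- ===== LEMMAS AND PROOFS =====

-- recursive characterisation of A's output
def gen5Aux : List Int → List Int
  | [] => []
  | x :: rest =>
    (if x ≠ 0 then (gen5_inner rest 0).toList else []) ++ gen5Aux rest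

-- A's index fold, started at offset k, computes gen5Aux of the k-suffix
theorem gen5_fold_eq (s : List Int) : ∀ (k : Nat) (acc : List Int),
    (PySem.List.pyRange (k : Int) (s.length) 1).foldl
      (fun acc i =>
        if PySem.List.pyGetD s i 0 ≠ 0 then
          acc ++ (gen5_inner (PySem.List.slice s (some (i + 1)) none) 0).toList
        else acc)
      acc = acc ++ gen5Aux (s.drop k) := by
  intro k
  induction hfuel : s.length - k generalizing k with
  | zero =>
    intro acc
    have hk : s.length ≤ k := by omega
    rw [PySem.List.pyRange_one_eq_nil (by exact_mod_cast hk),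
        List.drop_eq_nil_of_le hk]
    simp [gen5Aux]
  | succ n ih =>
    intro acc
    have hk : k < s.length := by omega
    rw [PySem.List.pyRange_one_cons (by exact_mod_cast hk)]
    simp only [List.foldl_cons]
    have hcast : ((k : Int) + 1) = ((k + 1 : Nat) : Int) := by push_cast; ring
    rw [hcast, ih (k + 1) (by omega)]
    have hget : PySem.List.pyGetD s (k : Int) 0 = s[k] := by
      rw [PySem.List.pyGetD_natCast]
      exact List.getD_eq_getElem s 0 hk
    have hslice : PySem.List.slice s (some ((k + 1 : Nat) : Int)) none = s.drop (k + 1) :=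
      PySem.List.slice_from_natCast s (k + 1)
    have hdrop : s.drop k = s[k] :: s.drop (k + 1) := List.drop_eq_getElem_cons hk
    rw [hget, hslice, hdrop]
    by_cases hx : s[k] = 0 <;> simp [gen5Aux, hx]

theorem gen5_eq_aux (s : List Int) : gen5 s = gen5Aux s := by
  have h := gen5_fold_eq s 0 []
  simpa [gen5] using h

-- B's fold with 'seen = true' and pending count c
theorem gen5_alt_fold_true (s : List Int) : ∀ (out : List Int) (c : Int),
    (s.foldl gen5_step (out, true, c)).1 = out ++ (gen5_inner s c).toList ++ gen5Aux s := by
  induction s with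
  | nil => intro out c; simp [gen5_inner, gen5Aux]
  | cons x rest ih =>
    intro out c
    rw [List.foldl_cons]
    by_cases hx : x = 0
    · rw [show gen5_step (out, true, c) x = (out, true, c + 1) from by simp [gen5_step, hx]]
      simp [ih, gen5_inner, gen5Aux, hx]
    · rw [show gen5_step (out, true, c) x = (out ++ [c], true, 0) from by simp [gen5_step, hx]]
      simp [ih, gen5_inner, gen5Aux, hx]

-- B's fold with 'seen = false'
theorem gen5_alt_fold_false (s : List Int) : ∀ (out : List Int) (c : Int),
    (s.foldl gen5_step (out, false, c)).1 = out ++ gen5Aux s := by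
  induction s with
  | nil => intro out c; simp [gen5Aux]
  | cons x rest ih =>
    intro out c
    rw [List.foldl_cons]
    by_cases hx : x = 0
    · rw [show gen5_step (out, false, c) x = (out, false, c + 1) from by simp [gen5_step, hx]]
      simp [ih, gen5Aux, hx]
    · rw [show gen5_step (out, false, c) x = (out, true, 0) from by simp [gen5_step, hx]]
      simp [gen5_alt_fold_true, gen5Aux, hx]

theorem gen5_alt_eq_aux (s : List Int) : gen5_alt s = gen5Aux s := by
  have h := gen5_alt_fold_false s [] 0
  simpa [gen5_alt] using h

-- ===== VERDICT (by name: the statement is the Claim_ definition above) =====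
theorem gen5_spec : Claim_equal_gen5 := by
  intro s _
  unfold Spec_gen5
  rw [gen5_eq_aux, gen5_alt_eq_aux]
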